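-- pv_equiv track=rewrite | github.com/sunxm2357/open_flamingo | caption_evaluate.py | create_html_page
-- ===== SOURCE A (Python) =====
-- def create_html_page(triplets):
--     """
--     Creates an HTML page to visualize the triplets.
--
--     Args:
--     triplets: A list of triplets. Each triplet is a tuple (image_path, predictions, labels), where
--         - image_path is a string path to the image file
--         - predictions is a list of predicted labels (strings)
--         - labels is a list of ground truth labels (strings)
--
--     Returns:
--     An HTML string.
--     """
--     html = ["<html><body><table>"]
--
--     # add a row for every 3 triplets
--     for i in range(0, len(triplets), 3):
--         html.append("<tr>")
--         for j in range(3):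
--             if i + j < len(triplets):
--                 image_path, predictions, labels = triplets[i + j]
--                 html.append("<td>")
--                 html.append(f'<img src="file://{image_path}" width="300" height="300"><br>')
--                 html.append("Predictions:<br>")
--                 html.append(', '.join(predictions))
--                 html.append("<br>")
--                 html.append("Labels:<br>")
--                 html.append(', '.join(labels))
--                 html.append("</td>")
--         html.append("</tr>")
--
--     html.append("</table></body></html>")
--
--     return "\n".join(html)
-- ===== SOURCE B (Python) =====
-- def _cell(triplet):
--     image_path, predictions, labels = triplet
--     return ["<td>",
--             f'<img src="file://{image_path}" width="300" height="300"><br>',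
--             "Predictions:<br>",
--             ', '.join(predictions),
--             "<br>",
--             "Labels:<br>",
--             ', '.join(labels),
--             "</td>"]
--
--
-- def _rows(cells):
--     out = []
--     while cells:
--         out.append("<tr>")
--         for cell in cells[:3]:
--             out.extend(cell)
--         out.append("</tr>")
--         cells = cells[3:]
--     return out
--
--
-- def create_html_page(triplets):
--     cells = [_cell(t) for t in triplets]
--     lines = ["<html><body><table>"] + _rows(cells) + ["</table></body></html>"]
--     return "\n".join(lines)
-- ===== Notes on version B (the rewrite author's own statement) =====
-- stated objective: alternative
-- what changed: A walks indices range(0,n,3) with an inner range(3) and an i+j<len bounds check; B first maps every triplet to its cell-fragment list, then recursively chunks the cell list by slicing [:3]/[3:] to emit rows, with no index arithmetic or bounds test.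
import Mathlib
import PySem

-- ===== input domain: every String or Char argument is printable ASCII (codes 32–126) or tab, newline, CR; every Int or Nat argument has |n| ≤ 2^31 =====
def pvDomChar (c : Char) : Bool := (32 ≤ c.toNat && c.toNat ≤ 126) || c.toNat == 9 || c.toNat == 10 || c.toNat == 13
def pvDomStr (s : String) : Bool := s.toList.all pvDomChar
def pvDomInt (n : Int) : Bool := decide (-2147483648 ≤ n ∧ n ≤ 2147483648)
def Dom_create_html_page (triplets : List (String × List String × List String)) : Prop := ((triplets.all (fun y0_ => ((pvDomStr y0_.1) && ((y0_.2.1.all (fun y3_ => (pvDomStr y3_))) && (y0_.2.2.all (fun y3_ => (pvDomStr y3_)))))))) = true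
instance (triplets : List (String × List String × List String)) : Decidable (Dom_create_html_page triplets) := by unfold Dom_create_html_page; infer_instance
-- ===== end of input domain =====

-- B replaces A's range(0,n,3)+inner-range(3)+bounds-check index walk by mapping each
-- triplet to its cell-fragment list and then chunking that list by slicing; same output.

-- ===== PORT A =====
def create_html_page (triplets : List (String × List String × List String)) : String :=
  let html : List String := ["<html><body><table>"]
  let html := (PySem.List.pyRange 0 (triplets.length : Int) 3).foldl (fun html i =>
    let html := html ++ ["<tr>"]
    let html := (PySem.List.pyRange 0 3 1).foldl (fun html j =>
      if i + j < (triplets.length : Int) then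
        match PySem.List.pyGet? triplets (i + j) with
        | some t =>
          html ++ ["<td>",
            "<img src=\"file://" ++ t.1 ++ "\" width=\"300\" height=\"300\"><br>",
            "Predictions:<br>",
            PySem.Str.join ", " t.2.1,
            "<br>",
            "Labels:<br>",
            PySem.Str.join ", " t.2.2,
            "</td>"]
        | none => html          -- unreachable: i + j < len guards the access
      else html) html
    html ++ ["</tr>"]) html
  PySem.Str.join "\n" (html ++ ["</table></body></html>"])

-- ===== PORT B =====
def pvCell (t : String × List String × List String) : List String :=
  ["<td>",
   "<img src=\"file://" ++ t.1 ++ "\" width=\"300\" height=\"300\"><br>",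
   "Predictions:<br>",
   PySem.Str.join ", " t.2.1,
   "<br>",
   "Labels:<br>",
   PySem.Str.join ", " t.2.2,
   "</td>"]

-- 'while cells: emit <tr>, the fragments of cells[:3], </tr>; cells = cells[3:]'
def pvRows (cells : List (List String)) : List String :=
  match cells with
  | [] => []
  | c :: rest =>
      ("<tr>" :: (c :: rest.take 2).flatten ++ ["</tr>"]) ++ pvRows (rest.drop 2)
termination_by cells.length
decreasing_by simp

def create_html_page_alt (triplets : List (String × List String × List String)) : String :=
  PySem.Str.join "\n"
    (["<html><body><table>"] ++ pvRows (triplets.map pvCell) ++ ["</table></body></html>"])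

-- ===== PRECONDITION & SPEC =====
def Spec_create_html_page (triplets : List (String × List String × List String)) (out : String) : Prop := out = create_html_page_alt triplets
instance (triplets : List (String × List String × List String)) (out : String) : Decidable (Spec_create_html_page triplets out) := by unfold Spec_create_html_page; infer_instance

-- ===== CLAIM (what is proved, stated in full; the proofs are below) =====
def Claim_equal_create_html_page : Prop := ∀ (triplets : List (String × List String × List String)), Dom_create_html_page triplets → Spec_create_html_page triplets (create_html_page triplets)

-- ===== LEMMAS AND PROOFS =====

lemma pvRows_nil : pvRows [] = [] := by
  rw [pvRows.eq_def]

lemma pvRows_cons (c : List String) (rest : List (List String)) :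
    pvRows (c :: rest)
      = ("<tr>" :: (c :: rest.take 2).flatten ++ ["</tr>"]) ++ pvRows (rest.drop 2) := by
  rw [pvRows.eq_def]

-- A's cell at index k (the inner-loop body's contribution for one j)
def cellAt (ts : List (String × List String × List String)) (k : Int) : List String :=
  if k < (ts.length : Int) then
    match PySem.List.pyGet? ts k with
    | some t => pvCell t
    | none => []
  else []

-- A's row for the chunk starting at index i
def rowA (ts : List (String × List String × List String)) (i : Int) : List String :=
  "<tr>" :: (cellAt ts (i + 0) ++ cellAt ts (i + 1) ++ cellAt ts (i + 2)) ++ ["</tr>"]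

lemma cellAt_eq (ts : List (String × List String × List String)) (k : ℕ) :
    cellAt ts (k : Int) = (match ts[k]? with | some t => pvCell t | none => []) := by
  unfold cellAt
  rw [PySem.List.pyGet?_natCast]
  split_ifs with h
  · rfl
  · have : ts[k]? = none := by
      rw [List.getElem?_eq_none]; omega
    rw [this]

lemma cellAt_shift (ts : List (String × List String × List String)) (k : ℕ) :
    cellAt ts ((k : Int) + 3) = cellAt (ts.drop 3) (k : Int) := by
  have h3 : ((k : Int) + 3) = ((k + 3 : ℕ) : Int) := by push_cast; ring
  rw [h3, cellAt_eq, cellAt_eq, List.getElem?_drop, Nat.add_comm 3 k]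

lemma rowA_shift (ts : List (String × List String × List String)) (x : Int) (hx : 0 ≤ x) :
    rowA ts (x + 3) = rowA (ts.drop 3) x := by
  obtain ⟨k, rfl⟩ := Int.eq_ofNat_of_zero_le hx
  unfold rowA
  have h0 : (k : Int) + 3 + 0 = ((k + 0 : ℕ) : Int) + 3 := by push_cast; ring
  have h1 : (k : Int) + 3 + 1 = ((k + 1 : ℕ) : Int) + 3 := by push_cast; ring
  have h2 : (k : Int) + 3 + 2 = ((k + 2 : ℕ) : Int) + 3 := by push_cast; ring
  have h0' : (k : Int) + 0 = ((k + 0 : ℕ) : Int) := by push_cast; ring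
  have h1' : (k : Int) + 1 = ((k + 1 : ℕ) : Int) := by push_cast; ring
  have h2' : (k : Int) + 2 = ((k + 2 : ℕ) : Int) := by push_cast; ring
  rw [h0, h1, h2, h0', h1', h2', cellAt_shift, cellAt_shift, cellAt_shift]

-- A's inner loop body, as 'append a cell'
lemma inner_step (ts : List (String × List String × List String))
    (html : List String) (k : Int) :
    (if k < (ts.length : Int) then
        match PySem.List.pyGet? ts k with
        | some t =>
          html ++ ["<td>",
            "<img src=\"file://" ++ t.1 ++ "\" width=\"300\" height=\"300\"><br>",
            "Predictions:<br>",
            PySem.Str.join ", " t.2.1,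
            "<br>",
            "Labels:<br>",
            PySem.Str.join ", " t.2.2,
            "</td>"]
        | none => html
      else html) = html ++ cellAt ts k := by
  unfold cellAt
  split_ifs with h
  · cases PySem.List.pyGet? ts k <;> simp [pvCell]
  · simp

-- A's outer-loop body appends exactly rowA ts i
lemma body_eq (ts : List (String × List String × List String))
    (html : List String) (i : Int) :
    ((PySem.List.pyRange 0 3 1).foldl (fun html j =>
      if i + j < (ts.length : Int) then
        match PySem.List.pyGet? ts (i + j) with
        | some t =>
          html ++ ["<td>",
            "<img src=\"file://" ++ t.1 ++ "\" width=\"300\" height=\"300\"><br>",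
            "Predictions:<br>",
            PySem.Str.join ", " t.2.1,
            "<br>",
            "Labels:<br>",
            PySem.Str.join ", " t.2.2,
            "</td>"]
        | none => html
      else html) (html ++ ["<tr>"])) ++ ["</tr>"]
    = html ++ rowA ts i := by
  have hr : PySem.List.pyRange 0 3 1 = [0, 1, 2] := by decide
  rw [hr]
  simp only [List.foldl_cons, List.foldl_nil]
  rw [inner_step, inner_step, inner_step]
  unfold rowA
  simp

-- pyRange 0 n 3 peels its head for 0 < n
lemma pyRange3_cons (n : Int) (hn : 0 < n) :
    PySem.List.pyRange 0 n 3 =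
      0 :: (PySem.List.pyRange 0 (n - 3) 3).map (· + 3) := by
  rw [PySem.List.pyRange_of_pos 0 n (by norm_num),
      PySem.List.pyRange_of_pos 0 (n - 3) (by norm_num)]
  by_cases h3 : 3 < n
  · rw [if_pos hn, if_pos (by omega : (0:Int) < n - 3)]
    have hm : ((n - 0 + 3 - 1) / 3).toNat = ((n - 3 - 0 + 3 - 1) / 3).toNat + 1 := by omega
    rw [hm, List.range_succ_eq_map]
    simp only [List.map_cons, List.map_map]
    congr 1
  · rw [if_pos hn, if_neg (by omega : ¬ (0:Int) < n - 3)]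
    have hm : ((n - 0 + 3 - 1) / 3).toNat = 1 := by omega
    rw [hm]
    simp

lemma pyRange3_nil (n : Int) (hn : n ≤ 0) : PySem.List.pyRange 0 n 3 = [] := by
  rw [PySem.List.pyRange_of_pos 0 n (by norm_num), if_neg (by omega)]
  simp

lemma flatMap_congr_mem {α β : Type} (l : List α) (f g : α → List β)
    (h : ∀ x ∈ l, f x = g x) : l.flatMap f = l.flatMap g := by
  induction l with
  | nil => rfl
  | cons a l ih =>
      simp only [List.flatMap_cons, h a (List.mem_cons_self ..),
        ih (fun x hx => h x (List.mem_cons_of_mem _ hx))]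

lemma row_head (t : String × List String × List String)
    (rest : List (String × List String × List String)) :
    cellAt (t :: rest) (0 + 0) ++ cellAt (t :: rest) (0 + 1) ++ cellAt (t :: rest) (0 + 2)
      = (pvCell t :: (rest.take 2).map pvCell).flatten := by
  have h0 := cellAt_eq (t :: rest) 0
  have h1 := cellAt_eq (t :: rest) 1
  have h2 := cellAt_eq (t :: rest) 2
  norm_num at h0 h1 h2
  match rest with
  | [] => simp [h0, h1, h2]
  | [b] => simp [h0, h1, h2]
  | b :: c :: rest' => simp [h0, h1, h2]

lemma main_lemma (N : ℕ) (ts : List (String × List String × List String))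
    (hN : ts.length ≤ N) :
    (PySem.List.pyRange 0 (ts.length : Int) 3).flatMap (rowA ts)
      = pvRows (ts.map pvCell) := by
  induction N generalizing ts with
  | zero =>
      have : ts = [] := List.eq_nil_of_length_eq_zero (by omega)
      subst this
      simp [pyRange3_nil, pvRows_nil]
  | succ N ih =>
      match ts with
      | [] => simp [pyRange3_nil, pvRows_nil]
      | t :: rest =>
          have hn : (0 : Int) < ((t :: rest).length : Int) := by
            simp
          rw [pyRange3_cons _ hn, List.flatMap_cons, List.flatMap_map]
          have hshift : (PySem.List.pyRange 0 (((t :: rest).length : Int) - 3) 3).flatMap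
              (fun a => rowA (t :: rest) (a + 3))
              = (PySem.List.pyRange 0 (((t :: rest).length : Int) - 3) 3).flatMap
                (rowA ((t :: rest).drop 3)) := by
            apply flatMap_congr_mem
            intro x hx
            have hx0 : 0 ≤ x := by
              have := (PySem.List.mem_pyRange_iff_of_pos (by norm_num : (0:Int) < 3) x).mp hx
              omega
            simpa using rowA_shift (t :: rest) x hx0
          rw [hshift]
          have hlen : PySem.List.pyRange 0 (((t :: rest).length : Int) - 3) 3
              = PySem.List.pyRange 0 ((((t :: rest).drop 3).length : Int)) 3 := by
            by_cases h3 : 3 ≤ (t :: rest).length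
            · congr 1
              simp only [List.length_drop, List.length_cons] at h3 ⊢
              push_cast
              omega
            · simp only [List.length_drop, List.length_cons] at h3 ⊢
              rw [pyRange3_nil _ (by push_cast; omega), pyRange3_nil _ (by push_cast; omega)]
          rw [hlen, ih ((t :: rest).drop 3)
            (by simp only [List.length_drop, List.length_cons] at hN ⊢; omega)]
          -- right-hand side
          show rowA (t :: rest) 0 ++ pvRows (((t :: rest).drop 3).map pvCell)
              = pvRows ((t :: rest).map pvCell)
          rw [List.map_cons]
          conv_rhs => rw [pvRows_cons]
          rw [← List.map_take, ← List.map_drop]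
          unfold rowA
          rw [row_head]
          simp [List.drop_succ_cons]

-- ===== VERDICT (by name: the statement is the Claim_ definition above) =====
theorem create_html_page_spec : Claim_equal_create_html_page := by
  intro ts _
  unfold Spec_create_html_page create_html_page create_html_page_alt
  simp only []
  rw [PySem.List.foldl_congr_mem _ _ (fun acc i => acc ++ rowA ts i) _
        (fun acc i _ => body_eq ts acc i),
      PySem.List.foldl_append_eq_flatMap,
      main_lemma ts.length ts le_rfl]
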